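-- pv_equiv track=rewrite | github.com/ashuping/hector | mod/rp/rp.py | _sanitize_channel_name
-- ===== SOURCE A (Python) =====
-- def _sanitize_channel_name(channel_name):
-- 	lower_name = channel_name.lower()
-- 	presanitized_name = ''
-- 	for character in lower_name:
-- 		if character not in 'abcdefghijklmnopqrstuvwxyz1234567890':
-- 			presanitized_name = presanitized_name + '-'
-- 		else:
-- 			presanitized_name = presanitized_name + character
--
--
-- 	sanitized_name = ''
-- 	last_character = None
-- 	for character in presanitized_name:
-- 		if character == '-':
-- 			if last_character:
-- 				if last_character != '-':
-- 					sanitized_name = sanitized_name + character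
-- 					last_character = character
-- 		else:
-- 			sanitized_name = sanitized_name + character
-- 			last_character = character
--
-- 	if sanitized_name[-1:] == '-':
-- 		sanitized_name = sanitized_name[:-1]
--
--
-- 	return sanitized_name
-- ===== SOURCE B (Python) =====
-- ALNUM = frozenset('abcdefghijklmnopqrstuvwxyz1234567890')
--
-- def _sanitize_channel_name(channel_name):
-- 	tokens = []
-- 	current = ''
-- 	for ch in channel_name.lower():
-- 		if ch in ALNUM:
-- 			current = current + ch
-- 		else:
-- 			if current:
-- 				tokens.append(current)
-- 			current = ''
-- 	if current:
-- 		tokens.append(current)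
-- 	return '-'.join(tokens)
-- ===== Notes on version B (the rewrite author's own statement) =====
-- stated objective: simpler
-- what changed: Replaced A's two-pass substitute-then-collapse last_character state machine plus trailing-dash strip with a single tokenize pass that collects maximal alphanumeric runs and joins them with dashes (one pass, no intermediate presanitized string).
import Mathlib
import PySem

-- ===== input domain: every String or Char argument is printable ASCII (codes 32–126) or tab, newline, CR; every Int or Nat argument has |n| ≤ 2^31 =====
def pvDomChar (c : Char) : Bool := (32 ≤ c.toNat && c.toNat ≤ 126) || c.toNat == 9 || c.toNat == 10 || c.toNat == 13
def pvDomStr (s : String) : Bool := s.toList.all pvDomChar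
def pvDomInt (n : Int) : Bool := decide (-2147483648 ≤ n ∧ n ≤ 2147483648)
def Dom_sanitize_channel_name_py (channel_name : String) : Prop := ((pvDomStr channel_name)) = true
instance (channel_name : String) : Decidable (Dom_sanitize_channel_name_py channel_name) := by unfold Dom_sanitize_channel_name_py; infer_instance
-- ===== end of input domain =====

-- B replaces A's two-pass substitute-then-collapse state machine and trailing strip with one
-- tokenize pass collecting maximal alphanumeric runs joined by dashes: a simpler decomposition.

-- ===== PORT A =====
def sanitize_channel_name_py (channel_name : String) : String :=
  let lower_name := (PySem.Str.lower channel_name).toList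
  let presanitized_name : List Char := lower_name.foldl (fun presanitized_name character =>
    if ("abcdefghijklmnopqrstuvwxyz1234567890".toList.contains character) = false
    then presanitized_name ++ ['-']
    else presanitized_name ++ [character]) []
  -- second loop: state = (sanitized_name, last_character); a 1-char string is always truthy,
  -- so `if last_character:` is the `some _` match
  let st := presanitized_name.foldl (fun (st : List Char × Option Char) character =>
    if character = '-' then
      match st.2 with
      | some last_character =>
        if last_character ≠ '-' then (st.1 ++ [character], some character) else st
      | none => st
    else (st.1 ++ [character], some character)) ([], none)
  let sanitized_name := st.1
  let sanitized_name :=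
    if PySem.List.slice sanitized_name (some (-1)) none = ['-']
    then PySem.List.slice sanitized_name none (some (-1))
    else sanitized_name
  String.mk sanitized_name

-- ===== PORT B =====
-- the loop of Source B: state = (current, tokens); after the loop the trailing run is flushed
def sanB_go : List Char → List Char → List (List Char) → List (List Char)
  | [], current, tokens => if current ≠ [] then tokens ++ [current] else tokens
  | ch :: rest, current, tokens =>
    if "abcdefghijklmnopqrstuvwxyz1234567890".toList.contains ch
    then sanB_go rest (current ++ [ch]) tokens
    else if current ≠ [] then sanB_go rest [] (tokens ++ [current])
    else sanB_go rest [] tokens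

def sanitize_channel_name_py_alt (channel_name : String) : String :=
  String.mk (PySem.Chars.join ['-'] (sanB_go (PySem.Str.lower channel_name).toList [] []))

-- ===== PRECONDITION & SPEC =====
def Spec_sanitize_channel_name_py (channel_name : String) (out : String) : Prop := out = sanitize_channel_name_py_alt channel_name
instance (channel_name : String) (out : String) : Decidable (Spec_sanitize_channel_name_py channel_name out) := by unfold Spec_sanitize_channel_name_py; infer_instance

-- ===== CLAIM (what is proved, stated in full; the proofs are below) =====
def Claim_equal_sanitize_channel_name_py : Prop := ∀ (channel_name : String), Dom_sanitize_channel_name_py channel_name → Spec_sanitize_channel_name_py channel_name (sanitize_channel_name_py channel_name)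

-- ===== LEMMAS AND PROOFS =====

-- abbreviations used only by the proofs
def pvOk (c : Char) : Bool := "abcdefghijklmnopqrstuvwxyz1234567890".toList.contains c
def pvJ (ts : List (List Char)) : List Char := PySem.Chars.join ['-'] ts
def pvStep2 (st : List Char × Option Char) (c : Char) : List Char × Option Char :=
  if c = '-' then
    match st.2 with
    | some last => if last ≠ '-' then (st.1 ++ [c], some c) else st
    | none => st
  else (st.1 ++ [c], some c)
def pvFinishA (san : List Char) : List Char :=
  if PySem.List.slice san (some (-1)) none = ['-']
  then PySem.List.slice san none (some (-1)) else san

-- A's invariant relating its state machine to B's tokenizer state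
def pvInv (san : List Char) (last : Option Char) (toks : List (List Char)) (cur : List Char) : Prop :=
  (last = none ∧ san = [] ∧ toks = [] ∧ cur = [])
  ∨ (last = some '-' ∧ cur = [] ∧ toks ≠ [] ∧ san = pvJ toks ++ ['-'])
  ∨ (∃ c cs, last = some c ∧ c ≠ '-' ∧ cur = cs ++ [c] ∧ san = pvJ (toks ++ [cur]))

lemma pvOk_ne_dash {c : Char} (h : pvOk c = true) : c ≠ '-' := by
  intro hc; subst hc; simp [pvOk] at h

lemma pvJ_snoc (ts : List (List Char)) (x : List Char) :
    pvJ (ts ++ [x]) = if ts = [] then x else pvJ ts ++ '-' :: x := by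
  induction ts with
  | nil => simp [pvJ, PySem.Chars.join_singleton]
  | cons h t ih =>
    cases t with
    | nil => simp [pvJ, PySem.Chars.join_cons_cons, PySem.Chars.join_singleton]
    | cons h2 t2 =>
      simp only [List.cons_append, pvJ, PySem.Chars.join_cons_cons] at ih ⊢
      rw [ih]; simp

lemma pvSlice_last (xs : List Char) (x : Char) :
    PySem.List.slice (xs ++ [x]) (some (-1)) none = [x] := by
  rw [PySem.List.slice_from_neg_one]
  simp

lemma pvPass1 (l : List Char) (acc : List Char) :
    l.foldl (fun pre c => if (pvOk c) = false then pre ++ ['-'] else pre ++ [c]) acc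
      = acc ++ l.map (fun c => if pvOk c = false then '-' else c) := by
  induction l generalizing acc with
  | nil => simp
  | cons h t ih => by_cases hc : pvOk h = false <;> simp [hc, ih, List.append_assoc]

lemma pvMain (l : List Char) (san : List Char) (last : Option Char)
    (toks : List (List Char)) (cur : List Char) (hinv : pvInv san last toks cur) :
    pvFinishA ((l.map (fun c => if pvOk c = false then '-' else c)).foldl pvStep2 (san, last)).1
      = pvJ (sanB_go l cur toks) := by
  induction l generalizing san last toks cur with
  | nil =>
    rcases hinv with ⟨hl, hs, ht, hc⟩ | ⟨hl, hc, ht, hs⟩ | ⟨c, cs, hl, hcne, hc, hs⟩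
    · subst hs ht hc
      simp [pvFinishA, PySem.List.slice_from_neg_one, sanB_go, pvJ, PySem.Chars.join_nil]
    · subst hs hc
      simp [pvFinishA, pvSlice_last, PySem.List.slice_to_neg_one, sanB_go]
    · subst hc hs
      have hsn : pvJ (toks ++ [cs ++ [c]]) = (if toks = [] then cs else pvJ toks ++ '-' :: cs) ++ [c] := by
        rw [pvJ_snoc]; split <;> simp
      simp only [List.map_nil, List.foldl_nil, pvFinishA, hsn, pvSlice_last]
      rw [if_neg (by simpa using hcne)]
      simp [sanB_go, hsn]
  | cons ch rest ih =>
    have hcont : ("abcdefghijklmnopqrstuvwxyz1234567890".toList.contains ch) = pvOk ch := rfl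
    by_cases hok : pvOk ch = true
    · have hne := pvOk_ne_dash hok
      have harg : (if pvOk ch = false then '-' else ch) = ch := by simp [hok]
      have hstep : pvStep2 (san, last) ch = (san ++ [ch], some ch) := by
        simp [pvStep2, hne]
      have hB : sanB_go (ch :: rest) cur toks = sanB_go rest (cur ++ [ch]) toks := by
        rw [sanB_go, hcont, hok]; simp
      rw [hB]
      simp only [List.map_cons, List.foldl_cons]
      rw [harg, hstep]
      apply ih
      -- invariant is re-established in the "inside a run" shape
      rcases hinv with ⟨hl, hs, ht, hc⟩ | ⟨hl, hc, ht, hs⟩ | ⟨c, cs, hl, hcne, hc, hs⟩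
      · subst hs ht hc
        exact Or.inr (Or.inr ⟨ch, [], rfl, hne, rfl, by simp [pvJ, PySem.Chars.join_singleton]⟩)
      · subst hs hc
        refine Or.inr (Or.inr ⟨ch, [], rfl, hne, rfl, ?_⟩)
        rw [pvJ_snoc, if_neg ht]; simp
      · subst hc hs
        refine Or.inr (Or.inr ⟨ch, cs ++ [c], rfl, hne, rfl, ?_⟩)
        rw [pvJ_snoc, pvJ_snoc]
        split <;> simp
    · have hok' : pvOk ch = false := by simpa using hok
      have harg : (if pvOk ch = false then '-' else ch) = '-' := by simp [hok']
      have hB : sanB_go (ch :: rest) cur toks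
          = if cur ≠ [] then sanB_go rest [] (toks ++ [cur]) else sanB_go rest [] toks := by
        rw [sanB_go, hcont, hok']; simp
      rw [hB]
      simp only [List.map_cons, List.foldl_cons]
      rw [harg]
      rcases hinv with ⟨hl, hs, ht, hc⟩ | ⟨hl, hc, ht, hs⟩ | ⟨c, cs, hl, hcne, hc, hs⟩
      · subst hl hs ht hc
        have hstep : pvStep2 (([] : List Char), (none : Option Char)) '-' = ([], none) := by
          simp [pvStep2]
        rw [hstep, if_neg (by simp)]
        exact ih _ _ _ _ (Or.inl ⟨rfl, rfl, rfl, rfl⟩)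
      · subst hl hc hs
        have hstep : pvStep2 (pvJ toks ++ ['-'], some '-') '-' = (pvJ toks ++ ['-'], some '-') := by
          simp [pvStep2]
        rw [hstep, if_neg (by simp)]
        exact ih _ _ _ _ (Or.inr (Or.inl ⟨rfl, rfl, ht, rfl⟩))
      · subst hl hc hs
        have hstep : pvStep2 (pvJ (toks ++ [cs ++ [c]]), some c) '-'
            = (pvJ (toks ++ [cs ++ [c]]) ++ ['-'], some '-') := by
          simp [pvStep2, hcne]
        rw [hstep, if_pos (by simp)]
        exact ih _ _ _ _ (Or.inr (Or.inl ⟨rfl, rfl, by simp, rfl⟩))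

-- ===== VERDICT (by name: the statement is the Claim_ definition above) =====
theorem sanitize_channel_name_py_spec : Claim_equal_sanitize_channel_name_py := by
  intro channel_name _
  show sanitize_channel_name_py channel_name = sanitize_channel_name_py_alt channel_name
  show String.mk (pvFinishA
      (((PySem.Str.lower channel_name).toList.foldl
          (fun pre c => if (pvOk c) = false then pre ++ ['-'] else pre ++ [c]) []).foldl
        pvStep2 ([], none)).1)
    = String.mk (pvJ (sanB_go (PySem.Str.lower channel_name).toList [] []))
  rw [pvPass1, List.nil_append]
  exact congrArg String.mk
    (pvMain (PySem.Str.lower channel_name).toList [] none [] [] (Or.inl ⟨rfl, rfl, rfl, rfl⟩))
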